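-- pv_equiv track=rewrite | github.com/bigmooon/coding_test | 11/문제38.py | solution
-- ===== SOURCE A (Python) =====
-- from collections import defaultdict
--
-- def solution(graph, start):
--   adj_list = defaultdict(list)
--
--   for u, v in graph:
--     adj_list[u].append(v)
--     adj_list[v] # v가 다른 노드의 출발점일 수 있으므로
--
--
--   def dfs(node, visited):
--     visited.add(node)
--     result.append(node)
--
--     # 현재 노드와 연결된 모든 인접 노드 순회
--     for neighbor in sorted(adj_list[node]):
--       if neighbor not in visited:
--         dfs(neighbor, visited)
--
--   visited = set()
--   result = []
--   dfs(start, visited)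
--
--   return result
-- ===== SOURCE B (Python) =====
-- from collections import defaultdict
--
-- def solution(graph, start):
--   adj_list = defaultdict(list)
--
--   for u, v in graph:
--     adj_list[u].append(v)
--     adj_list[v]  # v may only appear as a target; give it an (empty) entry too
--
--   visited = set()
--   result = []
--   stack = [start]
--   while stack:
--     node = stack.pop()
--     if node in visited:
--       continue
--     visited.add(node)
--     result.append(node)
--     # push sorted neighbors in reverse so the smallest is popped (visited) first
--     for neighbor in reversed(sorted(adj_list[node])):
--       stack.append(neighbor)
--
--   return result
-- ===== Notes on version B (the rewrite author's own statement) =====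
-- stated objective: idiomatic
-- what changed: Replaces the recursive closure-based DFS with an explicit-stack iterative DFS (mark-on-pop, reverse-sorted neighbor pushes) that reproduces the same preorder without recursion.
import Mathlib
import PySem

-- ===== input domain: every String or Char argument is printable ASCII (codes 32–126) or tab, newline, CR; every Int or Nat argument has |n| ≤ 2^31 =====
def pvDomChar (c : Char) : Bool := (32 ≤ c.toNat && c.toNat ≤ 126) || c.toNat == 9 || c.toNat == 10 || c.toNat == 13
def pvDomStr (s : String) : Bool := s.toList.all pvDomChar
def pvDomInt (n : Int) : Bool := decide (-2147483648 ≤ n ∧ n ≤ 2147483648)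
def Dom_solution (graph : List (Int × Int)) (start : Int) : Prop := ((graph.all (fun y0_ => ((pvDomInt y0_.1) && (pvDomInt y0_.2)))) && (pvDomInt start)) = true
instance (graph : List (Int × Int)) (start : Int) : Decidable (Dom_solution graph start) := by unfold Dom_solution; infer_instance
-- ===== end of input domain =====

-- B replaces A's recursive DFS closure by an explicit-stack iterative DFS (mark on pop,
-- reverse-sorted pushes) producing the identical preorder; objective: idiomatic, same cost.

-- shared adjacency construction (identical Python lines in both programs):
-- defaultdict(list); for u, v in graph: adj[u].append(v); adj[v]
def buildAdj (graph : List (Int × Int)) : PySem.Dict Int (List Int) :=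
  graph.foldl
    (fun d e =>
      let d1 := d.insert e.1 (d.getD e.1 [] ++ [e.2])
      if d1.contains e.2 then d1 else d1.insert e.2 [])
    PySem.Dict.empty

-- ===== PORT A =====
-- recursive dfs(node, visited): mark, append, recurse over sorted(adj[node]) unvisited.
-- The fuel argument is only a totality guard: it is decremented once per nested dfs call,
-- and 2*len(graph)+2 is proved sufficient below (the 0 branch is never reached).
mutual
def dfsA (adj : PySem.Dict Int (List Int)) (fuel : Nat) (node : Int)
    (vis : PySem.Set Int) (res : List Int) : PySem.Set Int × List Int :=
  goA adj fuel (PySem.List.sorted (adj.getD node []) (fun x => x) false)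
    (PySem.Set.add vis node) (res ++ [node])
termination_by (fuel, 1, 0)
decreasing_by
  exact Prod.Lex.right _ (Prod.Lex.left _ _ (by omega))

def goA (adj : PySem.Dict Int (List Int)) (fuel : Nat) (L : List Int)
    (vis : PySem.Set Int) (res : List Int) : PySem.Set Int × List Int :=
  match L with
  | [] => (vis, res)
  | n :: ns =>
    if n ∈ vis then goA adj fuel ns vis res
    else
      if hfl : fuel = 0 then (vis, res)   -- fuel guard, unreachable for the fuel solution supplies
      else
        let s := dfsA adj (fuel - 1) n vis res
        goA adj fuel ns s.1 s.2
termination_by (fuel, 0, L.length)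
decreasing_by
  all_goals first
    | exact Prod.Lex.right _ (Prod.Lex.right _ (by simp))
    | exact Prod.Lex.left _ _ (by omega)
end

def solution (graph : List (Int × Int)) (start : Int) : List Int :=
  (dfsA (buildAdj graph) (2 * graph.length + 2) start PySem.Set.empty []).2

-- ===== PORT B =====
-- 'for neighbor in reversed(sorted(...)): stack.append(neighbor)'; the Lean list head is the
-- Python stack top (append = cons, pop = head), so pushAll conses each element in turn.
def pushAll (L : List Int) (stack : List Int) : List Int :=
  L.foldl (fun st x => x :: st) stack

-- termination helpers for loopB (cited by its decreasing_by)
theorem pushAll_eq (L st : List Int) : pushAll L st = L.reverse ++ st := by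
  induction L generalizing st with
  | nil => simp [pushAll]
  | cons a L ih =>
    have hstep : pushAll (a :: L) st = pushAll L (a :: st) := rfl
    rw [hstep, ih]; simp

theorem mem_getD_values_flatten (d : PySem.Dict Int (List Int)) (k : Int) {x : Int}
    (hx : x ∈ d.getD k []) : x ∈ d.values.flatten := by
  rw [PySem.Dict.getD_eq_get?_getD] at hx
  cases hget : d.get? k with
  | none => rw [hget] at hx; simp at hx
  | some l =>
    rw [hget] at hx; simp only [Option.getD_some] at hx
    have hitems := PySem.Dict.mem_items_of_get?_eq_some d hget
    exact List.mem_flatten.mpr ⟨l, by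
      simp only [PySem.Dict.values]; exact List.mem_map.mpr ⟨(k, l), hitems, rfl⟩, hx⟩

def loopB (adj : PySem.Dict Int (List Int)) (vis : PySem.Set Int) (res : List Int)
    (stack : List Int) : List Int :=
  match stack with
  | [] => res
  | node :: rest =>
    if h : node ∈ vis then loopB adj vis res rest
    else
      loopB adj (PySem.Set.add vis node) (res ++ [node])
        (pushAll (PySem.List.sorted (adj.getD node []) (fun x => x) false).reverse rest)
termination_by
  ((((stack ++ adj.values.flatten).toFinset).filter (fun x => x ∉ vis)).card, stack.length)
decreasing_by
  · -- visited pop: stack shrinks, the unvisited count cannot grow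
    have hsub : (((rest ++ adj.values.flatten).toFinset).filter (fun x => x ∉ vis)) ⊆
        ((((node :: rest) ++ adj.values.flatten).toFinset).filter (fun x => x ∉ vis)) := by
      intro x hx
      rcases Finset.mem_filter.mp hx with ⟨h1, h2⟩
      refine Finset.mem_filter.mpr ⟨?_, h2⟩
      simp only [List.mem_toFinset, List.mem_append, List.mem_cons] at h1 ⊢
      tauto
    rcases lt_or_eq_of_le (Finset.card_le_card hsub) with hlt | heq
    · exact Prod.Lex.left _ _ hlt
    · rw [heq]; exact Prod.Lex.right _ (by simp)
  · -- unvisited pop: node leaves the unvisited set, everything pushed was already counted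
    apply Prod.Lex.left
    apply Finset.card_lt_card
    have hsub : (((pushAll (PySem.List.sorted (adj.getD node []) (fun x => x) false).reverse rest
          ++ adj.values.flatten).toFinset).filter (fun x => x ∉ PySem.Set.add vis node)) ⊆
        ((((node :: rest) ++ adj.values.flatten).toFinset).filter (fun x => x ∉ vis)) := by
      intro x hx
      rcases Finset.mem_filter.mp hx with ⟨h1, h2⟩
      have hxv : x ∉ vis := fun hv => h2 ((PySem.Set.mem_add vis node x).mpr (Or.inl hv))
      refine Finset.mem_filter.mpr ⟨?_, hxv⟩
      simp only [List.mem_toFinset, List.mem_append, List.mem_cons] at h1 ⊢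
      rcases h1 with h1 | h1
      · rw [pushAll_eq] at h1
        rcases List.mem_append.mp h1 with h1 | h1
        · right; exact mem_getD_values_flatten adj node
            ((PySem.List.sorted_perm (adj.getD node []) (fun x : Int => x) false).mem_iff.mp
              (by simpa using h1))
        · left; right; exact h1
      · right; exact h1
    refine (Finset.ssubset_iff_of_subset hsub).mpr ⟨node, Finset.mem_filter.mpr ⟨by simp, h⟩, ?_⟩
    intro hc
    exact (Finset.mem_filter.mp hc).2 ((PySem.Set.mem_add vis node node).mpr (Or.inr rfl))

def solution_alt (graph : List (Int × Int)) (start : Int) : List Int :=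
  loopB (buildAdj graph) PySem.Set.empty [] [start]

-- ===== PRECONDITION & SPEC =====
def Spec_solution (graph : List (Int × Int)) (start : Int) (out : List Int) : Prop := out = solution_alt graph start
instance (graph : List (Int × Int)) (start : Int) (out : List Int) : Decidable (Spec_solution graph start out) := by unfold Spec_solution; infer_instance

-- ===== CLAIM (what is proved, stated in full; the proofs are below) =====
def Claim_equal_solution : Prop := ∀ (graph : List (Int × Int)) (start : Int), Dom_solution graph start → Spec_solution graph start (solution graph start)

-- ===== LEMMAS AND PROOFS =====

-- step equations for the well-founded definitions
theorem goA_nil (adj : PySem.Dict Int (List Int)) (fuel : Nat) (vis : PySem.Set Int)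
    (res : List Int) : goA adj fuel [] vis res = (vis, res) := by
  rw [goA]

theorem goA_cons_mem (adj : PySem.Dict Int (List Int)) (fuel : Nat) (n : Int) (ns : List Int)
    (vis : PySem.Set Int) (res : List Int) (h : n ∈ vis) :
    goA adj fuel (n :: ns) vis res = goA adj fuel ns vis res := by
  rw [goA]; simp [h]

theorem goA_cons_not_mem (adj : PySem.Dict Int (List Int)) (fuel : Nat) (n : Int) (ns : List Int)
    (vis : PySem.Set Int) (res : List Int) (h : n ∉ vis) (hf : fuel ≠ 0) :
    goA adj fuel (n :: ns) vis res =
      goA adj fuel ns (dfsA adj (fuel - 1) n vis res).1 (dfsA adj (fuel - 1) n vis res).2 := by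
  rw [goA]; simp [h, hf]

theorem dfsA_eq (adj : PySem.Dict Int (List Int)) (fuel : Nat) (node : Int)
    (vis : PySem.Set Int) (res : List Int) :
    dfsA adj fuel node vis res =
      goA adj fuel (PySem.List.sorted (adj.getD node []) (fun x => x) false)
        (PySem.Set.add vis node) (res ++ [node]) := by
  rw [dfsA]

theorem loopB_nil (adj : PySem.Dict Int (List Int)) (vis : PySem.Set Int) (res : List Int) :
    loopB adj vis res [] = res := by
  rw [loopB]

theorem loopB_cons_mem (adj : PySem.Dict Int (List Int)) (vis : PySem.Set Int) (res : List Int)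
    (node : Int) (rest : List Int) (h : node ∈ vis) :
    loopB adj vis res (node :: rest) = loopB adj vis res rest := by
  rw [loopB]; simp [h]

theorem loopB_cons_not_mem (adj : PySem.Dict Int (List Int)) (vis : PySem.Set Int)
    (res : List Int) (node : Int) (rest : List Int) (h : node ∉ vis) :
    loopB adj vis res (node :: rest) =
      loopB adj (PySem.Set.add vis node) (res ++ [node])
        (pushAll (PySem.List.sorted (adj.getD node []) (fun x => x) false).reverse rest) := by
  rw [loopB]; simp [h]

-- the number of still-unvisited nodes among all neighbor-list entries of adj
def UC (adj : PySem.Dict Int (List Int)) (vis : PySem.Set Int) : Nat :=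
  ((adj.values.flatten.toFinset).filter (fun x => x ∉ vis)).card

theorem UC_anti (adj : PySem.Dict Int (List Int)) (vis vis' : PySem.Set Int)
    (h : ∀ x, x ∈ vis → x ∈ vis') : UC adj vis' ≤ UC adj vis := by
  apply Finset.card_le_card
  intro x hx
  rcases Finset.mem_filter.mp hx with ⟨h1, h2⟩
  exact Finset.mem_filter.mpr ⟨h1, fun hv => h2 (h x hv)⟩

theorem UC_add (adj : PySem.Dict Int (List Int)) (vis : PySem.Set Int) (n : Int)
    (hn : n ∈ adj.values.flatten) (hv : n ∉ vis) :
    UC adj (PySem.Set.add vis n) + 1 ≤ UC adj vis := by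
  have hmem : n ∈ (adj.values.flatten.toFinset).filter (fun x => x ∉ vis) :=
    Finset.mem_filter.mpr ⟨List.mem_toFinset.mpr hn, hv⟩
  have hsub : (adj.values.flatten.toFinset).filter (fun x => x ∉ PySem.Set.add vis n) ⊆
      ((adj.values.flatten.toFinset).filter (fun x => x ∉ vis)).erase n := by
    intro x hx
    rcases Finset.mem_filter.mp hx with ⟨h1, h2⟩
    refine Finset.mem_erase.mpr ⟨?_, Finset.mem_filter.mpr ⟨h1, ?_⟩⟩
    · exact fun he => h2 ((PySem.Set.mem_add vis n x).mpr (Or.inr he))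
    · exact fun hv' => h2 ((PySem.Set.mem_add vis n x).mpr (Or.inl hv'))
  have := Finset.card_le_card hsub
  rw [Finset.card_erase_of_mem hmem] at this
  have hpos : 0 < ((adj.values.flatten.toFinset).filter (fun x => x ∉ vis)).card :=
    Finset.card_pos.mpr ⟨n, hmem⟩
  unfold UC
  omega

-- visited only grows through dfsA / goA
mutual
theorem visMono_dfs (adj : PySem.Dict Int (List Int)) (fuel : Nat) (node : Int)
    (vis : PySem.Set Int) (res : List Int) :
    ∀ x, x ∈ vis → x ∈ (dfsA adj fuel node vis res).1 := by
  intro x hx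
  rw [dfsA_eq]
  exact visMono_go adj fuel _ _ _ x ((PySem.Set.mem_add vis node x).mpr (Or.inl hx))
termination_by (fuel, 1, 0)

theorem visMono_go (adj : PySem.Dict Int (List Int)) (fuel : Nat) (L : List Int)
    (vis : PySem.Set Int) (res : List Int) :
    ∀ x, x ∈ vis → x ∈ (goA adj fuel L vis res).1 := by
  intro x hx
  match L with
  | [] => rw [goA_nil]; exact hx
  | n :: ns =>
    by_cases hn : n ∈ vis
    · rw [goA_cons_mem _ _ _ _ _ _ hn]; exact visMono_go adj fuel ns vis res x hx
    · by_cases hf : fuel = 0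
      · rw [goA]; simp [hn, hf]; exact hx
      · rw [goA_cons_not_mem _ _ _ _ _ _ hn hf]
        exact visMono_go adj fuel ns _ _ x (visMono_dfs adj (fuel - 1) n vis res x hx)
termination_by (fuel, 0, L.length)
decreasing_by
  · exact Prod.Lex.right _ (Prod.Lex.right _ (by simp))
  · exact Prod.Lex.left _ _ (by omega)
  · exact Prod.Lex.right _ (Prod.Lex.right _ (by simp))
end

-- the central correspondence: the explicit stack simulates the recursion
mutual
theorem K_dfs (adj : PySem.Dict Int (List Int)) (fuel : Nat) (node : Int)
    (vis : PySem.Set Int) (res : List Int) (rest : List Int)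
    (hnode : node ∉ vis) (hfuel : UC adj (PySem.Set.add vis node) ≤ fuel) :
    loopB adj vis res (node :: rest) =
      loopB adj (dfsA adj fuel node vis res).1 (dfsA adj fuel node vis res).2 rest := by
  rw [loopB_cons_not_mem _ _ _ _ _ hnode, pushAll_eq, List.reverse_reverse, dfsA_eq]
  exact K_go adj fuel _ _ _ rest
    (fun x hx => mem_getD_values_flatten adj node
      ((PySem.List.sorted_perm (adj.getD node []) (fun x : Int => x) false).mem_iff.mp hx))
    hfuel
termination_by (fuel, 1, 0)

theorem K_go (adj : PySem.Dict Int (List Int)) (fuel : Nat) (L : List Int)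
    (vis : PySem.Set Int) (res : List Int) (rest : List Int)
    (hL : ∀ x ∈ L, x ∈ adj.values.flatten) (hfuel : UC adj vis ≤ fuel) :
    loopB adj vis res (L ++ rest) =
      loopB adj (goA adj fuel L vis res).1 (goA adj fuel L vis res).2 rest := by
  match L with
  | [] => rw [goA_nil]; rfl
  | n :: ns =>
    by_cases hn : n ∈ vis
    · rw [goA_cons_mem _ _ _ _ _ _ hn, List.cons_append, loopB_cons_mem _ _ _ _ _ hn]
      exact K_go adj fuel ns vis res rest (fun x hx => hL x (List.mem_cons_of_mem _ hx)) hfuel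
    · have hnU : n ∈ adj.values.flatten := hL n List.mem_cons_self
      have hdec : UC adj (PySem.Set.add vis n) + 1 ≤ UC adj vis := UC_add adj vis n hnU hn
      have hf : fuel ≠ 0 := by omega
      rw [goA_cons_not_mem _ _ _ _ _ _ hn hf, List.cons_append,
        K_dfs adj (fuel - 1) n vis res (ns ++ rest) hn (by omega)]
      exact K_go adj fuel ns _ _ rest (fun x hx => hL x (List.mem_cons_of_mem _ hx))
        (le_trans (UC_anti adj vis _ (visMono_dfs adj (fuel - 1) n vis res)) hfuel)
termination_by (fuel, 0, L.length)
decreasing_by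
  · exact Prod.Lex.right _ (Prod.Lex.right _ (by simp))
  · exact Prod.Lex.left _ _ (by omega)
  · exact Prod.Lex.right _ (Prod.Lex.right _ (by simp))
end

-- every neighbor-list entry of buildAdj g is a second component of an edge of g
theorem flatten_insert_sub (d : PySem.Dict Int (List Int)) (k : Int) (l : List Int) (x : Int)
    (hx : x ∈ (d.insert k l).values.flatten) : x ∈ l ∨ x ∈ d.values.flatten := by
  rcases List.mem_flatten.mp hx with ⟨w, hw, hxw⟩
  rcases PySem.Dict.mem_values_insert d k l w hw with h | h
  · subst h; exact Or.inl hxw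
  · exact Or.inr (List.mem_flatten.mpr ⟨w, h, hxw⟩)

theorem flatten_buildAdj_step (d : PySem.Dict Int (List Int)) (e : Int × Int) (x : Int)
    (hx : x ∈ ((let d1 := d.insert e.1 (d.getD e.1 [] ++ [e.2]);
        if d1.contains e.2 then d1 else d1.insert e.2 []).values.flatten)) :
    x ∈ d.values.flatten ∨ x = e.2 := by
  simp only at hx
  have hx1 : x ∈ (d.insert e.1 (d.getD e.1 [] ++ [e.2])).values.flatten := by
    split at hx
    · exact hx
    · rcases flatten_insert_sub _ e.2 [] x hx with h | h
      · simp at h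
      · exact h
  rcases flatten_insert_sub d e.1 _ x hx1 with h | h
  · rcases List.mem_append.mp h with h | h
    · exact Or.inl (mem_getD_values_flatten d e.1 h)
    · simp at h; exact Or.inr h
  · exact Or.inl h

theorem flatten_buildAdj_fold (g : List (Int × Int)) (d : PySem.Dict Int (List Int)) (x : Int)
    (hx : x ∈ (g.foldl
        (fun d e =>
          let d1 := d.insert e.1 (d.getD e.1 [] ++ [e.2])
          if d1.contains e.2 then d1 else d1.insert e.2 []) d).values.flatten) :
    x ∈ d.values.flatten ∨ x ∈ g.map Prod.snd := by
  induction g generalizing d with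
  | nil => exact Or.inl hx
  | cons e g ih =>
    rw [List.foldl_cons] at hx
    rcases ih _ hx with h | h
    · rcases flatten_buildAdj_step d e x h with h' | h'
      · exact Or.inl h'
      · exact Or.inr (by simp [h'])
    · exact Or.inr (by simpa using Or.inr (List.mem_map.mp h))

theorem UC_buildAdj_le (g : List (Int × Int)) (vis : PySem.Set Int) :
    UC (buildAdj g) vis ≤ g.length := by
  unfold UC
  calc ((((buildAdj g).values.flatten.toFinset).filter (fun x => x ∉ vis)).card)
      ≤ ((buildAdj g).values.flatten.toFinset).card :=
        Finset.card_le_card (Finset.filter_subset _ _)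
    _ ≤ ((g.map Prod.snd).toFinset).card := by
        apply Finset.card_le_card
        intro x hx
        rw [List.mem_toFinset] at hx ⊢
        rcases flatten_buildAdj_fold g PySem.Dict.empty x hx with h | h
        · simp [PySem.Dict.empty, PySem.Dict.values] at h
        · exact h
    _ ≤ (g.map Prod.snd).length := List.toFinset_card_le _
    _ = g.length := List.length_map ..


-- ===== VERDICT (by name: the statement is the Claim_ definition above) =====
theorem solution_spec : Claim_equal_solution := by
  intro graph start _
  unfold Spec_solution solution solution_alt
  rw [K_dfs (buildAdj graph) (2 * graph.length + 2) start PySem.Set.empty [] []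
    (by simp [PySem.Set.empty])
    (le_trans (UC_buildAdj_le graph _) (by omega)),
    loopB_nil]
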